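-- pv_equiv track=rewrite | github.com/dthulke/i6_core | meta/mm_sequence.py | multiple_aligns_per_split_sequence
-- ===== SOURCE A (Python) =====
-- def multiple_aligns_per_split_sequence(
--     num_split, num_align, num_accumulate, mark_accumulate=True, mark_align=True
-- ):
--     seq = []
--     for s_idx in range(num_split):
--         seq.append("split")
--         for aln_idx in range(num_align):
--             seq.append(
--                 "align" + ("!" if aln_idx == num_align - 1 and mark_align else "")
--             )
--             for acc_idx in range(num_accumulate):
--                 seq.append(
--                     "accumulate"
--                     + (
--                         "!"
--                         if acc_idx == num_accumulate - 1
--                         and aln_idx == num_align - 1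
--                         and mark_accumulate
--                         else ""
--                     )
--                 )
--     return seq
-- ===== SOURCE B (Python) =====
-- def multiple_aligns_per_split_sequence(
--     num_split, num_align, num_accumulate, mark_accumulate=True, mark_align=True
-- ):
--     # Loop-free: build one per-split block by list replication, then replicate it.
--     if num_split <= 0:
--         return []
--     if num_align <= 0:
--         return ["split"] * num_split
--     accs = ["accumulate"] * num_accumulate
--     if num_accumulate > 0 and mark_accumulate:
--         last_accs = ["accumulate"] * (num_accumulate - 1) + ["accumulate!"]
--     else:
--         last_accs = accs
--     block = (
--         ["split"]
--         + (["align"] + accs) * (num_align - 1)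
--         + [("align!" if mark_align else "align")]
--         + last_accs
--     )
--     return block * num_split
-- ===== Notes on version B (the rewrite author's own statement) =====
-- stated objective: simpler
-- what changed: Replaced A's three nested index loops of appends by loop-free construction: build the per-align accumulate run and the per-split block once via list replication (['x'] * n) and return block * num_split.
import Mathlib
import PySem

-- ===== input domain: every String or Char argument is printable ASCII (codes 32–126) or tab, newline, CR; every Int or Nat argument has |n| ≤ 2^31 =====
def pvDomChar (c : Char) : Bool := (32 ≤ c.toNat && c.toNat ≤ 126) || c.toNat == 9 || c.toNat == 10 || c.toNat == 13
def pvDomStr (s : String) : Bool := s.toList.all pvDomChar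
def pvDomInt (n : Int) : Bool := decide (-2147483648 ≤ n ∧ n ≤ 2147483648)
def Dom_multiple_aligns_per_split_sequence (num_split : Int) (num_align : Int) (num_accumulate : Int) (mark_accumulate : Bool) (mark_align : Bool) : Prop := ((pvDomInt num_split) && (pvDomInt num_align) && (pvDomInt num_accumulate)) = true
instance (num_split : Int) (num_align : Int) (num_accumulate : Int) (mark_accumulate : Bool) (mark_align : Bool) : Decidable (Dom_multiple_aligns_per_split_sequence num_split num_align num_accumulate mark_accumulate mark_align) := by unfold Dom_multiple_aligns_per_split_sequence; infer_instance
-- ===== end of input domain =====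

-- B replaces A's three nested marker-appending loops by loop-free list replication
-- (build each run once, replicate with `*`); objective: simpler, same asymptotic cost.

-- ===== PORT A =====
-- literal transliteration of A's triple nested loop of appends
def multiple_aligns_per_split_sequence (num_split : Int) (num_align : Int) (num_accumulate : Int) (mark_accumulate : Bool) (mark_align : Bool) : List String :=
  (PySem.List.pyRange 0 num_split 1).foldl (fun seq _s_idx =>
    (PySem.List.pyRange 0 num_align 1).foldl (fun seq aln_idx =>
      (PySem.List.pyRange 0 num_accumulate 1).foldl (fun seq acc_idx =>
        seq ++ ["accumulate" ++ (if acc_idx == num_accumulate - 1 && aln_idx == num_align - 1 && mark_accumulate then "!" else "")])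
        (seq ++ ["align" ++ (if aln_idx == num_align - 1 && mark_align then "!" else "")]))
      (seq ++ ["split"])) []

-- ===== PORT B =====
-- literal transliteration of Source B: build runs by replication, no loops
def multiple_aligns_per_split_sequence_alt (num_split : Int) (num_align : Int) (num_accumulate : Int) (mark_accumulate : Bool) (mark_align : Bool) : List String :=
  if num_split ≤ 0 then [] else
  if num_align ≤ 0 then PySem.List.pyRepeat ["split"] num_split else
  let accs := PySem.List.pyRepeat ["accumulate"] num_accumulate
  let last_accs :=
    if 0 < num_accumulate && mark_accumulate then
      PySem.List.pyRepeat ["accumulate"] (num_accumulate - 1) ++ ["accumulate!"]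
    else accs
  let block :=
    ["split"] ++ PySem.List.pyRepeat (["align"] ++ accs) (num_align - 1)
      ++ [(if mark_align then "align!" else "align")] ++ last_accs
  PySem.List.pyRepeat block num_split

-- ===== PRECONDITION & SPEC =====
def Spec_multiple_aligns_per_split_sequence (num_split : Int) (num_align : Int) (num_accumulate : Int) (mark_accumulate : Bool) (mark_align : Bool) (out : List String) : Prop := out = multiple_aligns_per_split_sequence_alt num_split num_align num_accumulate mark_accumulate mark_align
instance (num_split : Int) (num_align : Int) (num_accumulate : Int) (mark_accumulate : Bool) (mark_align : Bool) (out : List String) : Decidable (Spec_multiple_aligns_per_split_sequence num_split num_align num_accumulate mark_accumulate mark_align out) := by unfold Spec_multiple_aligns_per_split_sequence; infer_instance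

-- ===== CLAIM (what is proved, stated in full; the proofs are below) =====
def Claim_equal_multiple_aligns_per_split_sequence : Prop := ∀ (num_split : Int) (num_align : Int) (num_accumulate : Int) (mark_accumulate : Bool) (mark_align : Bool), Dom_multiple_aligns_per_split_sequence num_split num_align num_accumulate mark_accumulate mark_align → Spec_multiple_aligns_per_split_sequence num_split num_align num_accumulate mark_accumulate mark_align (multiple_aligns_per_split_sequence num_split num_align num_accumulate mark_accumulate mark_align)

-- ===== LEMMAS AND PROOFS =====

theorem pv_map_mark {α : Type} (n : Int) (u v : α) (F : Int → α)
    (hF : ∀ c, F c = if c == n - 1 then v else u) :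
    (PySem.List.pyRange 0 n 1).map F
      = List.replicate (n - 1).toNat u ++ (if 0 < n then [v] else []) := by
  by_cases hn : 0 < n
  · have hrel : n = (n - 1) + 1 := by ring
    rw [hrel, PySem.List.pyRange_one_succ_right (by omega), List.map_append]
    have h1 : (PySem.List.pyRange 0 (n - 1) 1).map F
        = (PySem.List.pyRange 0 (n - 1) 1).map (fun _ => u) := by
      apply List.map_congr_left
      intro a ha
      have := PySem.List.mem_pyRange_one.mp ha
      rw [hF a]; simp only [beq_iff_eq]; rw [if_neg (by omega)]
    rw [h1, List.map_const', PySem.List.length_pyRange_one]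
    have h2 : F (n - 1) = v := by rw [hF]; simp
    simp [h2, hn, hrel.symm]
  · rw [PySem.List.pyRange_one_eq_nil (by omega)]
    have : (n - 1).toNat = 0 := by omega
    simp [this, hn]

theorem pv_flatMap_mark {α : Type} (n : Int) (u v : List α) (F : Int → List α)
    (hF : ∀ a, F a = if a == n - 1 then v else u) :
    (PySem.List.pyRange 0 n 1).flatMap F
      = (List.replicate (n - 1).toNat u).flatten ++ (if 0 < n then v else []) := by
  rw [List.flatMap_def, pv_map_mark n u v F hF, List.flatten_append]
  by_cases hn : 0 < n <;> simp [hn]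

theorem pv_flatMap_const {α : Type} (n : Int) (u : List α) :
    (PySem.List.pyRange 0 n 1).flatMap (fun _ => u)
      = (List.replicate n.toNat u).flatten := by
  rw [List.flatMap_def, List.map_const', PySem.List.length_pyRange_one]
  norm_num

theorem multiple_aligns_per_split_sequence_eq (num_split num_align num_accumulate : Int)
    (mark_accumulate mark_align : Bool) :
    multiple_aligns_per_split_sequence num_split num_align num_accumulate mark_accumulate mark_align
      = multiple_aligns_per_split_sequence_alt num_split num_align num_accumulate mark_accumulate mark_align := by
  unfold multiple_aligns_per_split_sequence multiple_aligns_per_split_sequence_alt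
  by_cases hs : num_split ≤ 0
  · rw [show PySem.List.pyRange 0 num_split 1 = [] from PySem.List.pyRange_one_eq_nil (by omega)]
    simp [hs]
  rw [if_neg hs]
  by_cases hna0 : num_align ≤ 0
  · rw [if_pos hna0,
      show PySem.List.pyRange 0 num_align 1 = [] from PySem.List.pyRange_one_eq_nil (by omega)]
    simp only [List.foldl_nil, PySem.List.foldl_append_singleton_eq_map, List.nil_append]
    rw [PySem.List.pyRepeat_singleton, List.map_const', PySem.List.length_pyRange_one]
    norm_num
  rw [if_neg hna0]
  have hnapos : 0 < num_align := by omega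
  simp only [PySem.List.foldl_append_singleton_eq_map, List.append_assoc,
    PySem.List.foldl_append_eq_flatMap, List.cons_append, List.nil_append]
  -- lastAccs on the A side
  have haccs : PySem.List.pyRepeat ["accumulate"] num_accumulate = List.replicate num_accumulate.toNat "accumulate" :=
    PySem.List.pyRepeat_singleton _ _
  have hlastA : (PySem.List.pyRange 0 num_accumulate 1).map
      (fun c => "accumulate" ++ (if c == num_accumulate - 1 && true && mark_accumulate then "!" else ""))
      = (if 0 < num_accumulate && mark_accumulate then PySem.List.pyRepeat ["accumulate"] (num_accumulate - 1) ++ ["accumulate!"]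
         else PySem.List.pyRepeat ["accumulate"] num_accumulate) := by
    cases mark_accumulate with
    | false =>
      have hf : (fun c : Int => "accumulate" ++ (if c == num_accumulate - 1 && true && false then "!" else "")) = (fun _ => "accumulate") := by funext c; simp
      rw [hf, List.map_const', PySem.List.length_pyRange_one, haccs]
      simp
    | true =>
      rw [pv_map_mark num_accumulate "accumulate" "accumulate!" _ (by intro c; by_cases h : c = num_accumulate - 1 <;> simp [h])]
      by_cases hnc : 0 < num_accumulate
      · simp [hnc, PySem.List.pyRepeat_singleton]
      · have : (num_accumulate - 1).toNat = 0 := by omega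
        have h2 : num_accumulate.toNat = 0 := by omega
        simp [hnc, this, haccs, h2]
  -- the per-split block
  have hblock : ("split" :: (PySem.List.pyRange 0 num_align 1).flatMap (fun a =>
        ("align" ++ (if a == num_align - 1 && mark_align then "!" else "")) ::
        (PySem.List.pyRange 0 num_accumulate 1).map (fun c =>
          "accumulate" ++ (if c == num_accumulate - 1 && a == num_align - 1 && mark_accumulate then "!" else ""))))
      = (if 0 < num_align then
          ["split"] ++ PySem.List.pyRepeat (["align"] ++ PySem.List.pyRepeat ["accumulate"] num_accumulate) (num_align - 1)
            ++ [(if mark_align then "align!" else "align")]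
            ++ (if 0 < num_accumulate && mark_accumulate then PySem.List.pyRepeat ["accumulate"] (num_accumulate - 1) ++ ["accumulate!"]
                else PySem.List.pyRepeat ["accumulate"] num_accumulate)
         else ["split"]) := by
    rw [pv_flatMap_mark num_align
      ("align" :: List.replicate num_accumulate.toNat "accumulate")
      ((if mark_align then "align!" else "align") ::
        (if 0 < num_accumulate && mark_accumulate then List.replicate (num_accumulate-1).toNat "accumulate" ++ ["accumulate!"]
         else List.replicate num_accumulate.toNat "accumulate"))
      _ ?_]
    · by_cases hna : 0 < num_align
      · simp only [hna, if_true, PySem.List.pyRepeat_singleton]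
        show _ = _ ++ (List.replicate (num_align-1).toNat _).flatten ++ _ ++ _
        simp [List.append_assoc]
      · have h0 : (num_align - 1).toNat = 0 := by omega
        simp [hna, h0]
    · intro a
      by_cases h : a = num_align - 1
      · subst h
        simp only [BEq.rfl, Bool.true_and, if_true]
        congr 1
        · cases mark_align <;> rfl
        · rw [hlastA]
          by_cases hnc : 0 < num_accumulate <;> cases mark_accumulate <;>
            simp [hnc, haccs, PySem.List.pyRepeat_singleton]
      · have hb : (a == num_align - 1) = false := by simp [h]
        simp [hb]
  rw [hblock, if_pos hnapos, pv_flatMap_const]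
  show _ = (List.replicate num_split.toNat _).flatten
  simp only [List.cons_append, List.append_assoc, List.nil_append]


-- ===== VERDICT (by name: the statement is the Claim_ definition above) =====
theorem multiple_aligns_per_split_sequence_spec : Claim_equal_multiple_aligns_per_split_sequence := by
  intro ns na nc ma mg _
  exact multiple_aligns_per_split_sequence_eq ns na nc ma mg
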